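-- pv_equiv track=rewrite | github.com/KMaxSikI/DZ_Lesson-4_moduls | Fano.py | reverse_fano
-- ===== SOURCE A (Python) =====
-- def reverse_fano(fano):
--     counter = 0
--
--     for n in fano:
--         for j in fano:
--             if len(n) <= len(j):
--                 if not j.endswith(n):
--                     continue
--                 else:
--                     counter += 1
--             else:
--                 continue
--
--     return counter == len(fano)
-- ===== SOURCE B (Python) =====
-- def reverse_fano(fano):
--     cnt = {}
--     for s in fano:
--         cnt[s] = cnt.get(s, 0) + 1
--     total = 0
--     for j in fano:
--         for i in range(len(j) + 1):
--             total += cnt.get(j[i:], 0)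
--     return total == len(fano)
-- ===== Notes on version B (the rewrite author's own statement) =====
-- stated objective: faster
-- what changed: Replaced the all-pairs double scan with endswith by a hash counter of the strings built once, then for each string summing the counter over its own suffixes, removing the inner scan over the list.
import Mathlib
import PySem

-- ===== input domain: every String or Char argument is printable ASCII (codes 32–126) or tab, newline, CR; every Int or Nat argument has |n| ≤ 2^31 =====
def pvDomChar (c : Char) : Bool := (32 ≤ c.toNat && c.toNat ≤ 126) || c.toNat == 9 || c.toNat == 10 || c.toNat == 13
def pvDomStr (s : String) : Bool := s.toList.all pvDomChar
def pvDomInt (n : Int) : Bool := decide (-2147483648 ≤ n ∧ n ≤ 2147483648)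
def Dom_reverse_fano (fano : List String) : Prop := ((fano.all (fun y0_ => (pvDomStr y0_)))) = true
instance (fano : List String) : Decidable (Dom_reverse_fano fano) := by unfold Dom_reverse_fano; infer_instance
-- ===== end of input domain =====

-- B replaces A's all-pairs endswith scan by a counter dict built once plus per-string suffix lookups (objective: faster).

-- ===== PORT A =====
def reverse_fano (fano : List String) : Bool :=
  let counter : Int := fano.foldl (fun c n =>
    fano.foldl (fun c2 j =>
      if PySem.Str.len n ≤ PySem.Str.len j then
        if !(PySem.Str.endswith j n) then c2 else c2 + 1
      else c2) c) 0
  decide (counter = (fano.length : Int))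

-- ===== PORT B =====
def reverse_fano_alt (fano : List String) : Bool :=
  let cnt : PySem.Dict String Int :=
    fano.foldl (fun d s => d.modify s 0 (· + 1)) PySem.Dict.empty
  let total : Int := fano.foldl (fun acc j =>
    (PySem.List.pyRange 0 (PySem.Str.len j + 1) 1).foldl
      (fun acc2 i => acc2 + cnt.getD (PySem.Str.slice j (some i) none) 0) acc) 0
  decide (total = (fano.length : Int))

-- ===== PRECONDITION & SPEC =====
def Spec_reverse_fano (fano : List String) (out : Bool) : Prop := out = reverse_fano_alt fano
instance (fano : List String) (out : Bool) : Decidable (Spec_reverse_fano fano out) := by unfold Spec_reverse_fano; infer_instance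

-- ===== CLAIM (what is proved, stated in full; the proofs are below) =====
def Claim_equal_reverse_fano : Prop := ∀ (fano : List String), Dom_reverse_fano fano → Spec_reverse_fano fano (reverse_fano fano)

-- ===== LEMMAS AND PROOFS =====

-- Summing the multiplicities of the distinct members of S inside l counts the elements of l belonging to S.
theorem pv_sum_count (S : List String) (hS : S.Nodup) (l : List String) :
    (S.map (fun s => (List.count s l : Int))).sum = (l.countP (fun n => decide (n ∈ S)) : Int) := by
  induction l with
  | nil => simp
  | cons a l ih =>
    have h1 : (S.map (fun s => (List.count s (a :: l) : Int))).sum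
        = (S.map (fun s => (List.count s l : Int) + (if (a == s) = true then (1:Int) else 0))).sum := by
      apply congrArg
      apply List.map_congr_left
      intro s _
      rw [List.count_cons]
      push_cast
      rfl
    have h2 : (S.map (fun s => if (a == s) = true then (1:Int) else 0)).sum
        = (if a ∈ S then (1:Int) else 0) := by
      rw [PySem.List.sum_map_ite_one_zero (fun s => a == s) S]
      have h3 : List.countP (fun s => a == s) S = List.count a S := by
        apply List.countP_congr
        intro x _
        simp only [beq_iff_eq]
        exact eq_comm
      rw [h3, hS.count]
      split_ifs <;> simp
    rw [h1, PySem.List.sum_map_add_int, ih, h2, List.countP_cons]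
    push_cast
    by_cases hm : a ∈ S
    · simp [hm]
    · simp [hm]

-- The distinct suffix strings of j, one per drop length.
def pvSuffixes (cs : List Char) : List String :=
  (List.range (cs.length + 1)).map (fun k => String.ofList (cs.drop k))

theorem pv_nodup_suffixes (cs : List Char) : (pvSuffixes cs).Nodup := by
  apply List.Nodup.map_on _ (List.nodup_range)
  intro x hx y hy hxy
  have hlen : (cs.drop x).length = (cs.drop y).length := by
    have : cs.drop x = cs.drop y := by
      have := congrArg String.toList hxy
      simpa using this
    rw [this]
  simp only [List.length_drop] at hlen
  simp only [List.mem_range] at hx hy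
  omega

theorem pv_mem_suffixes (cs : List Char) (n : String) :
    n ∈ pvSuffixes cs ↔ n.toList <:+ cs := by
  constructor
  · intro h
    rcases List.mem_map.mp h with ⟨k, _, hk⟩
    have : n.toList = cs.drop k := by rw [← hk]; simp
    rw [this]
    exact List.drop_suffix k cs
  · intro h
    have hd := List.suffix_iff_eq_drop.mp h
    apply List.mem_map.mpr
    refine ⟨cs.length - n.toList.length, ?_, ?_⟩
    · simp only [List.mem_range]; omega
    · rw [← hd]; simp

-- Per-string suffix sum of multiplicities = number of elements of l that are suffixes of j.
theorem pv_count_suffixes (l : List String) (j : String) :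
    ((List.range (j.toList.length + 1)).map
        (fun k => (List.count (String.ofList (j.toList.drop k)) l : Int))).sum
      = (l.countP (fun n => PySem.Str.endswith j n) : Int) := by
  have hmap : (List.range (j.toList.length + 1)).map
        (fun k => (List.count (String.ofList (j.toList.drop k)) l : Int))
      = (pvSuffixes j.toList).map (fun s => (List.count s l : Int)) := by
    simp [pvSuffixes, List.map_map, Function.comp]
  rw [hmap, pv_sum_count _ (pv_nodup_suffixes j.toList) l]
  have : l.countP (fun n => decide (n ∈ pvSuffixes j.toList))
      = l.countP (fun n => PySem.Str.endswith j n) := by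
    apply List.countP_congr
    intro n _
    simp only [decide_eq_true_eq, PySem.Str.endswith_eq, PySem.Chars.endswith_iff]
    exact pv_mem_suffixes j.toList n
  rw [this]

-- Double sums over two lists commute.
theorem pv_sum_swap (l1 l2 : List String) (f : String → String → Int) :
    (l1.map (fun n => (l2.map (fun j => f n j)).sum)).sum
      = (l2.map (fun j => (l1.map (fun n => f n j)).sum)).sum := by
  induction l1 with
  | nil => simp
  | cons a l ih =>
    rw [List.map_cons, List.sum_cons, ih,
        ← PySem.List.sum_map_add_int l2 (fun j => f a j) (fun j => (l.map (fun n => f n j)).sum)]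
    apply congrArg
    apply List.map_congr_left
    intro j _
    rw [List.map_cons, List.sum_cons]

-- A's counter in closed form.
theorem pv_counterA (fano : List String) :
    fano.foldl (fun c n =>
      fano.foldl (fun c2 j =>
        if PySem.Str.len n ≤ PySem.Str.len j then
          if !(PySem.Str.endswith j n) then c2 else c2 + 1
        else c2) c) 0
    = (fano.map (fun n => (fano.countP (fun j => PySem.Str.endswith j n) : Int))).sum := by
  have hstep : ∀ (c : Int), ∀ n ∈ fano,
      fano.foldl (fun c2 j =>
        if PySem.Str.len n ≤ PySem.Str.len j then
          if !(PySem.Str.endswith j n) then c2 else c2 + 1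
        else c2) c
      = c + (fano.countP (fun j => PySem.Str.endswith j n) : Int) := by
    intro c n _
    have hcongr : ∀ (c2 : Int), ∀ j ∈ fano,
        (if PySem.Str.len n ≤ PySem.Str.len j then
          if !(PySem.Str.endswith j n) then c2 else c2 + 1
        else c2)
        = (if PySem.Str.endswith j n = true then c2 + 1 else c2) := by
      intro c2 j _
      by_cases he : PySem.Str.endswith j n = true
      · have hl : PySem.Str.len n ≤ PySem.Str.len j := by
          rw [PySem.Str.endswith_eq] at he
          have := ((PySem.Chars.endswith_iff _ _).mp he).length_le
          simp only [PySem.Str.len_eq]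
          exact_mod_cast this
        rw [if_pos hl, he]
        simp
      · have hf : PySem.Str.endswith j n = false := by
          revert he; cases PySem.Str.endswith j n <;> simp
        rw [hf]
        simp only [Bool.not_false, if_true]
        split_ifs <;> simp_all
    rw [PySem.List.foldl_congr_mem fano _ _ c hcongr]
    exact PySem.List.foldl_if_add_one (fun j => PySem.Str.endswith j n) fano c
  rw [PySem.List.foldl_congr_mem fano _
      (fun c n => c + (fano.countP (fun j => PySem.Str.endswith j n) : Int)) 0 hstep]
  rw [PySem.List.foldl_add fano (fun n => (fano.countP (fun j => PySem.Str.endswith j n) : Int)) 0]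
  simp

-- B's total in closed form.
theorem pv_totalB (fano : List String) :
    fano.foldl (fun acc j =>
      (PySem.List.pyRange 0 (PySem.Str.len j + 1) 1).foldl
        (fun acc2 i => acc2 + (fano.foldl (fun d s => d.modify s 0 (· + 1)) PySem.Dict.empty).getD
            (PySem.Str.slice j (some i) none) 0) acc) 0
    = (fano.map (fun j => (fano.countP (fun n => PySem.Str.endswith j n) : Int))).sum := by
  have hcnt : (fano.foldl (fun d s => d.modify s 0 (· + 1)) PySem.Dict.empty)
      = PySem.Dict.counter fano := (PySem.Dict.counter_eq_foldl fano).symm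
  have hstep : ∀ (acc : Int), ∀ j ∈ fano,
      (PySem.List.pyRange 0 (PySem.Str.len j + 1) 1).foldl
        (fun acc2 i => acc2 + (fano.foldl (fun d s => d.modify s 0 (· + 1)) PySem.Dict.empty).getD
            (PySem.Str.slice j (some i) none) 0) acc
      = acc + (fano.countP (fun n => PySem.Str.endswith j n) : Int) := by
    intro acc j _
    rw [PySem.List.foldl_add (PySem.List.pyRange 0 (PySem.Str.len j + 1) 1)
        (fun i => (fano.foldl (fun d s => d.modify s 0 (· + 1)) PySem.Dict.empty).getD
            (PySem.Str.slice j (some i) none) 0) acc]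
    congr 1
    have hr : PySem.List.pyRange 0 (PySem.Str.len j + 1) 1
        = (List.range (j.toList.length + 1)).map (fun (k : Nat) => (k : Int)) := by
      rw [PySem.List.pyRange_one, PySem.Str.len_eq]
      simp only [sub_zero]
      have : ((j.toList.length : Int) + 1).toNat = j.toList.length + 1 := by omega
      rw [this]
      apply List.map_congr_left
      intro k _
      exact zero_add _
    rw [hr, List.map_map]
    have hg : ∀ k ∈ List.range (j.toList.length + 1),
        ((fun i => (fano.foldl (fun d s => d.modify s 0 (· + 1)) PySem.Dict.empty).getD
            (PySem.Str.slice j (some i) none) 0) ∘ (fun k : ℕ => (k : Int))) k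
        = (List.count (String.ofList (j.toList.drop k)) fano : Int) := by
      intro k _
      simp only [Function.comp]
      have hs : PySem.Str.slice j (some (k : Int)) none = String.ofList (j.toList.drop k) := by
        apply String.ext
        rw [PySem.Str.toList_slice]
        simp [PySem.List.slice_from_natCast]
      rw [hs, hcnt, PySem.Dict.getD_counter]
    rw [List.map_congr_left hg]
    exact pv_count_suffixes fano j
  rw [PySem.List.foldl_congr_mem fano _
      (fun acc j => acc + (fano.countP (fun n => PySem.Str.endswith j n) : Int)) 0 hstep]
  rw [PySem.List.foldl_add fano (fun j => (fano.countP (fun n => PySem.Str.endswith j n) : Int)) 0]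
  simp

-- The two closed forms are the same double count, summed in the two orders.
theorem pv_counts_eq (fano : List String) :
    (fano.map (fun n => (fano.countP (fun j => PySem.Str.endswith j n) : Int))).sum
      = (fano.map (fun j => (fano.countP (fun n => PySem.Str.endswith j n) : Int))).sum := by
  have h1 : ∀ n, (fano.countP (fun j => PySem.Str.endswith j n) : Int)
      = (fano.map (fun j => if PySem.Str.endswith j n = true then (1:Int) else 0)).sum :=
    fun n => (PySem.List.sum_map_ite_one_zero (fun j => PySem.Str.endswith j n) fano).symm
  calc (fano.map (fun n => (fano.countP (fun j => PySem.Str.endswith j n) : Int))).sum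
      = (fano.map (fun n => (fano.map (fun j =>
          if PySem.Str.endswith j n = true then (1:Int) else 0)).sum)).sum := by
        exact congrArg _ (List.map_congr_left (fun n _ => h1 n))
    _ = (fano.map (fun j => (fano.map (fun n =>
          if PySem.Str.endswith j n = true then (1:Int) else 0)).sum)).sum :=
        pv_sum_swap fano fano (fun n j => if PySem.Str.endswith j n = true then (1:Int) else 0)
    _ = (fano.map (fun j => (fano.countP (fun n => PySem.Str.endswith j n) : Int))).sum := by
        apply congrArg
        apply List.map_congr_left
        intro j _
        exact PySem.List.sum_map_ite_one_zero (fun n => PySem.Str.endswith j n) fano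

-- ===== VERDICT (by name: the statement is the Claim_ definition above) =====
theorem reverse_fano_spec : Claim_equal_reverse_fano := by
  intro fano _
  unfold Spec_reverse_fano reverse_fano reverse_fano_alt
  simp only []
  rw [pv_counterA fano, pv_totalB fano, pv_counts_eq fano]
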